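-- pv_equiv track=rewrite | github.com/localparty/integers | solutions-with-prize/paper28-pvnp/code/reverify_o7_holonomy.py | eval_clause_nae
-- ===== SOURCE A (Python) =====
-- def eval_clause_nae(clause, assignment):
--     """NAE-clause: not all literals have the same truth value."""
--     vals = []
--     for lit in clause:
--         v = abs(lit)
--         val = assignment[v-1]
--         lit_val = val if lit > 0 else (not val)
--         vals.append(lit_val)
--     return not (all(vals) or not any(vals))
-- ===== SOURCE B (Python) =====
-- def eval_clause_nae(clause, assignment):
--     """NAE-clause via compare-to-first: not-all-equal iff some literal's value
--     differs from the first literal's value (empty clause -> False)."""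
--     if not clause:
--         return False
--
--     def lit_val(lit):
--         v = assignment[abs(lit) - 1]
--         return v if lit > 0 else not v
--
--     first = lit_val(clause[0])
--     return any(lit_val(lit) != first for lit in clause[1:])
-- ===== Notes on version B (the rewrite author's own statement) =====
-- stated objective: alternative
-- what changed: Replaces A's materialise-all-values-then-combine-all()/any() with a compare-to-first algorithm: evaluate the first literal once and return whether any later literal's value differs from it (not-all-equal iff some element differs from the first).
import Mathlib
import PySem

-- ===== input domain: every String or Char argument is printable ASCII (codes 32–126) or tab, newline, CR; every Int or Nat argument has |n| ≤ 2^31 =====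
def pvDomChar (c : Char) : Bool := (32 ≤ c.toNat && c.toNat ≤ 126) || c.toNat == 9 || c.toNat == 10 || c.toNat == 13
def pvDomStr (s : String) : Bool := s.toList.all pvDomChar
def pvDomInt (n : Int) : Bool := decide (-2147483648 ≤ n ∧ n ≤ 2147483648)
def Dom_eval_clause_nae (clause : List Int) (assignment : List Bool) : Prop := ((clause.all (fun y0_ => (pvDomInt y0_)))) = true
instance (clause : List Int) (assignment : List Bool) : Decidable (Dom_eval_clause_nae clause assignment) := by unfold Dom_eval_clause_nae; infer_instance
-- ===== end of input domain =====

-- B replaces A's materialise-all-values + all()/any() combination by a compare-to-first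
-- algorithm (not-all-equal iff some later literal's value differs from the first's).

-- ===== PORT A =====
-- vals-building loop of A: collects each literal's truth value in order; none = IndexError
def naeVals (assignment : List Bool) : List Int → Option (List Bool)
  | [] => some []
  | lit :: rest =>
    match PySem.List.pyGet? assignment ((lit.natAbs : Int) - 1) with
    | none => none
    | some val =>
      match naeVals assignment rest with
      | none => none
      | some vs => some ((if lit > 0 then val else !val) :: vs)

def eval_clause_nae (clause : List Int) (assignment : List Bool) : Bool :=
  match naeVals assignment clause with
  | none => false  -- Python raises IndexError here; excluded by Pre_
  | some vals => !(vals.all id || !(vals.any id))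

-- ===== PORT B =====
-- lit_val helper of B: none = IndexError (excluded by Pre_)
def litVal? (assignment : List Bool) (lit : Int) : Option Bool :=
  (PySem.List.pyGet? assignment ((lit.natAbs : Int) - 1)).map
    (fun val => if lit > 0 then val else !val)

def eval_clause_nae_alt (clause : List Int) (assignment : List Bool) : Bool :=
  match clause with
  | [] => false
  | lit0 :: rest =>
    match litVal? assignment lit0 with
    | none => false  -- Python raises IndexError here; excluded by Pre_
    | some first =>
      rest.any (fun lit => ((litVal? assignment lit).map (fun w => w != first)).getD false)

-- ===== PRECONDITION & SPEC =====
-- Pre_ excludes exactly the inputs where Python's assignment[abs(lit)-1] raises IndexError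
-- (note abs(lit)-1 = -1 for lit = 0, which Python accepts on a nonempty assignment).
def Pre_eval_clause_nae (clause : List Int) (assignment : List Bool) : Prop :=
  ∀ lit ∈ clause, lit.natAbs ≤ assignment.length ∧ 1 ≤ assignment.length
instance (clause : List Int) (assignment : List Bool) : Decidable (Pre_eval_clause_nae clause assignment) := by
  unfold Pre_eval_clause_nae; infer_instance

def pvWitness_eval_clause_nae : List Int × List Bool := ([1, -2, 3], [true, true, false])

def Spec_eval_clause_nae (clause : List Int) (assignment : List Bool) (out : Bool) : Prop :=
  out = eval_clause_nae_alt clause assignment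
instance (clause : List Int) (assignment : List Bool) (out : Bool) : Decidable (Spec_eval_clause_nae clause assignment out) := by
  unfold Spec_eval_clause_nae; infer_instance

-- ===== CLAIM =====
def Claim_equal_eval_clause_nae : Prop :=
  ∀ (clause : List Int) (assignment : List Bool), Dom_eval_clause_nae clause assignment →
    Pre_eval_clause_nae clause assignment →
    Spec_eval_clause_nae clause assignment (eval_clause_nae clause assignment)

-- ===== LEMMAS AND PROOFS =====

-- a Python index inside [-len, len) never raises
lemma pyGet?_some_of_inRange (xs : List Bool) (i : Int)
    (h : PySem.Raise.InRange xs.length i) :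
    ∃ v, PySem.List.pyGet? xs i = some v := by
  unfold PySem.Raise.InRange at h
  rcases lt_or_ge i 0 with hi | hi
  · rw [PySem.List.pyGet?_neg xs hi (by omega), List.getElem?_eq_getElem (by omega)]
    exact ⟨_, rfl⟩
  · rw [PySem.List.pyGet?_of_nonneg xs hi, List.getElem?_eq_getElem (by omega)]
    exact ⟨_, rfl⟩

-- under Pre_, A's loop succeeds and its values are exactly B's lit_val's
lemma naeVals_some (assignment : List Bool) (clause : List Int)
    (h : ∀ lit ∈ clause, lit.natAbs ≤ assignment.length ∧ 1 ≤ assignment.length) :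
    ∃ vs, naeVals assignment clause = some vs := by
  induction clause with
  | nil => exact ⟨[], rfl⟩
  | cons lit rest ih =>
    obtain ⟨h1, h2⟩ := h lit (List.mem_cons_self)
    have hr : PySem.Raise.InRange assignment.length ((lit.natAbs : Int) - 1) := by
      unfold PySem.Raise.InRange; omega
    obtain ⟨v, hv⟩ := pyGet?_some_of_inRange assignment _ hr
    obtain ⟨vs, hvs⟩ := ih (fun l hl => h l (List.mem_cons_of_mem _ hl))
    exact ⟨(if lit > 0 then v else !v) :: vs, by simp only [naeVals, hv, hvs]⟩

-- B's any-over-rest computes (≠ first) over the tail of A's vals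
lemma any_litVal_eq (assignment : List Bool) (rest : List Int) (ws : List Bool)
    (hws : naeVals assignment rest = some ws) (first : Bool) :
    rest.any (fun lit => ((litVal? assignment lit).map (fun w => w != first)).getD false)
      = ws.any (fun w => w != first) := by
  induction rest generalizing ws with
  | nil => simp only [naeVals] at hws; cases hws; rfl
  | cons lit tail ih =>
    simp only [naeVals] at hws
    cases hg : PySem.List.pyGet? assignment ((lit.natAbs : Int) - 1) with
    | none => rw [hg] at hws; exact absurd hws (by simp)
    | some val =>
      rw [hg] at hws
      cases ht : naeVals assignment tail with
      | none => rw [ht] at hws; exact absurd hws (by simp)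
      | some ts =>
        rw [ht] at hws
        simp only [Option.some.injEq] at hws
        subst hws
        have hg' : PySem.List.pyGet? assignment (|lit| - 1) = some val := by
          rw [Int.abs_eq_natAbs]; exact hg
        have hl : litVal? assignment lit = some (if lit > 0 then val else !val) := by
          simp [litVal?, hg']
        rw [List.any_cons, List.any_cons, hl, ih ts ht]
        simp

-- Boolean core: not-all-equal = some element differs from the first
lemma nae_eq_compare_first (v0 : Bool) (ws : List Bool) :
    (!((v0 :: ws).all id || !((v0 :: ws).any id))) = ws.any (fun w => w != v0) := by
  induction ws with
  | nil => cases v0 <;> decide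
  | cons w ws ih => cases v0 <;> cases w <;> simp_all [List.all_cons, List.any_cons]

-- ===== VERDICT =====
theorem eval_clause_nae_spec : Claim_equal_eval_clause_nae := by
  intro clause assignment _ hpre
  unfold Spec_eval_clause_nae eval_clause_nae eval_clause_nae_alt
  cases clause with
  | nil => rfl
  | cons lit0 rest =>
    obtain ⟨h1, h2⟩ := hpre lit0 (List.mem_cons_self)
    have hr : PySem.Raise.InRange assignment.length ((lit0.natAbs : Int) - 1) := by
      unfold PySem.Raise.InRange; omega
    obtain ⟨v, hv⟩ := pyGet?_some_of_inRange assignment _ hr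
    obtain ⟨ws, hws⟩ := naeVals_some assignment rest
      (fun l hl => hpre l (List.mem_cons_of_mem _ hl))
    have hv' : PySem.List.pyGet? assignment (|lit0| - 1) = some v := by
      rw [Int.abs_eq_natAbs]; exact hv
    have hl0 : litVal? assignment lit0 = some (if lit0 > 0 then v else !v) := by
      simp [litVal?, hv']
    simp only [naeVals, hv, hws, hl0]
    rw [any_litVal_eq assignment rest ws hws]
    exact nae_eq_compare_first _ ws
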